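-- pv_equiv track=rewrite | github.com/MatthewGerges/SchematIQ | KiCad10_Cursor/Code/src/lib/kicad_api.py | _extract_named_symbol
-- ===== SOURCE A (Python) =====
-- def _extract_named_symbol(lib_content, target_name):
--     """Extract a specific top-level symbol by name from a packed library file.
--
--     In packed KiCad 9 libraries, one .kicad_sym contains many symbols.
--     Sub-symbols (e.g. "NE555D_0_1") are nested inside the parent and are
--     captured automatically by the balanced-paren extraction.
--
--     The closing quote + newline in the search pattern guarantees we won't
--     match sub-symbols whose names are longer (e.g. searching "NE555D"
--     won't match "NE555D_0_1" because the quote closes the name exactly).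
--
--     Returns (lib_id, symbol_def) or (None, None).
--     """
--     search_for = f'(symbol "{target_name}"\n'
--     idx = lib_content.find(search_for)
--     if idx == -1:
--         return None, None
--
--     start = idx
--     balance = 0
--     end = -1
--     for i in range(start, len(lib_content)):
--         if lib_content[i] == '(':
--             balance += 1
--         elif lib_content[i] == ')':
--             balance -= 1
--         if balance == 0:
--             end = i + 1
--             break
--     if end == -1:
--         return None, None
--     return target_name, lib_content[start:end]
-- ===== SOURCE B (Python) =====
-- def _extract_named_symbol(lib_content, target_name):
--     """Find-skip reimplementation: jump between '(' / ')' delimiters with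
--     str.find instead of scanning every character."""
--     search_for = f'(symbol "{target_name}"\n'
--     start = lib_content.find(search_for)
--     if start == -1:
--         return None, None
--     pos = start
--     balance = 0
--     while True:
--         c = lib_content.find(')', pos)
--         if c == -1:
--             return None, None
--         o = lib_content.find('(', pos)
--         if o != -1 and o < c:
--             balance += 1
--             pos = o + 1
--         elif balance > 1:
--             balance -= 1
--             pos = c + 1
--         else:
--             return target_name, lib_content[start:c + 1]
-- ===== Notes on version B (the rewrite author's own statement) =====
-- stated objective: alternative
-- what changed: A scans every character from the match position updating a balance counter; B keeps a position pointer and repeatedly jumps with str.find to the next '(' or ')' delimiter, updating the balance only at delimiters and slicing at the closing ')' that brings it to zero.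
import Mathlib
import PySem

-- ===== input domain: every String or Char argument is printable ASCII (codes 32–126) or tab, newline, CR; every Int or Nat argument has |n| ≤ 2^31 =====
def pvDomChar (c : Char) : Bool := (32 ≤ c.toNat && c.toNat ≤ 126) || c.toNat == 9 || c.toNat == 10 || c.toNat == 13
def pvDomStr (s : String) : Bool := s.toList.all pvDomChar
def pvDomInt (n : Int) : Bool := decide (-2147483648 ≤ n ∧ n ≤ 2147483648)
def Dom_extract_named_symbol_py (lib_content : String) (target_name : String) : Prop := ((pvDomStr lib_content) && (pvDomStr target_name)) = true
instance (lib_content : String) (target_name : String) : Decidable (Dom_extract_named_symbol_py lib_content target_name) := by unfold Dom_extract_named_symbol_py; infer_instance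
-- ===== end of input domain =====

-- B replaces A's character-by-character balance scan by a delimiter-skipping loop driven by str.find: an alternative decomposition with the same results.

-- ===== PORT A =====
-- A's inner loop: `for i in range(start, len(lib_content))` with a balance counter and
-- early `break`; returns the Python variable `end` as `some e` (`none` = end stayed -1).
def aScan (s : List Char) (i : Nat) (balance : Int) : Option Nat :=
  if h : i < s.length then
    let b' := if s[i] = '(' then balance + 1 else if s[i] = ')' then balance - 1 else balance
    if b' = 0 then some (i + 1) else aScan s (i + 1) b'
  else none
termination_by s.length - i

def extract_named_symbol_py (lib_content : String) (target_name : String) : Option String × Option String :=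
  let search_for := String.ofList ("(symbol \"".toList ++ target_name.toList ++ "\"\n".toList)
  let idx := PySem.Str.find lib_content search_for
  if idx = -1 then (none, none)
  else
    let start := idx.toNat
    match aScan lib_content.toList start 0 with
    | none => (none, none)
    | some e => (some target_name, some (PySem.Str.slice lib_content (some (start : Int)) (some (e : Int))))

-- ===== PORT B =====
-- B's `while True` loop; `fuel` only makes the recursion total (pos strictly grows and
-- stays ≤ length, so fuel = length + 1 is never exhausted).
def bLoop (lib_content : String) (target_name : String) (start : Nat) : Nat → Nat → Int → Option String × Option String
  | 0, _, _ => (none, none)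
  | fuel + 1, pos, balance =>
    let c := PySem.Str.findFrom lib_content ")" (pos : Int) none
    if c = -1 then (none, none)
    else
      let o := PySem.Str.findFrom lib_content "(" (pos : Int) none
      if o ≠ -1 ∧ o < c then
        bLoop lib_content target_name start fuel (o.toNat + 1) (balance + 1)
      else if 1 < balance then
        bLoop lib_content target_name start fuel (c.toNat + 1) (balance - 1)
      else
        (some target_name, some (PySem.Str.slice lib_content (some (start : Int)) (some (c + 1))))

def extract_named_symbol_py_alt (lib_content : String) (target_name : String) : Option String × Option String :=
  let search_for := String.ofList ("(symbol \"".toList ++ target_name.toList ++ "\"\n".toList)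
  let idx := PySem.Str.find lib_content search_for
  if idx = -1 then (none, none)
  else
    bLoop lib_content target_name idx.toNat (lib_content.toList.length + 1) idx.toNat 0

-- ===== PRECONDITION & SPEC =====
def Spec_extract_named_symbol_py (lib_content : String) (target_name : String) (out : Option String × Option String) : Prop := out = extract_named_symbol_py_alt lib_content target_name
instance (lib_content : String) (target_name : String) (out : Option String × Option String) : Decidable (Spec_extract_named_symbol_py lib_content target_name out) := by unfold Spec_extract_named_symbol_py; infer_instance

-- ===== CLAIM (what is proved, stated in full; the proofs are below) =====
def Claim_equal_extract_named_symbol_py : Prop := ∀ (lib_content : String) (target_name : String), Dom_extract_named_symbol_py lib_content target_name → Spec_extract_named_symbol_py lib_content target_name (extract_named_symbol_py lib_content target_name)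

-- ===== LEMMAS AND PROOFS =====

lemma toList_close : ")".toList = [')'] := by decide

lemma toList_open : "(".toList = ['('] := by decide

lemma toList_needle_head : "(symbol \"".toList = '(' :: "symbol \"".toList := by decide

lemma head?_drop' (l : List Char) (n : Nat) : (l.drop n).head? = l[n]? := by
  simp [List.head?_eq_getElem?, List.getElem?_drop]

lemma single_prefix_iff (a : Char) (l : List Char) (j : Nat) :
    ([a] <+: l.drop j) ↔ l[j]? = some a := by
  rw [← head?_drop']
  cases h : l.drop j with
  | nil => simp
  | cons b t =>
    simp [List.cons_prefix_cons]
    exact eq_comm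

lemma prefix_drop_infix {p l : List Char} {pos j : Nat} (hj : pos ≤ j)
    (h : p <+: l.drop j) : p <:+: l.drop pos := by
  have hd : l.drop j = (l.drop pos).drop (j - pos) := by
    rw [List.drop_drop]; congr 1; omega
  rw [hd] at h
  exact h.isInfix.trans (List.drop_suffix _ _).isInfix

lemma no_char_of_not_infix {a : Char} {l : List Char} {pos j : Nat}
    (hnot : ¬ [a] <:+: l.drop pos) (hj : pos ≤ j) : l[j]? ≠ some a := fun h =>
  hnot (prefix_drop_infix hj ((single_prefix_iff a l j).mpr h))

-- A's scan skips runs of non-paren characters when balance ≠ 0.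
lemma aScan_skip (s : List Char) (b : Int) (hb : b ≠ 0) :
    ∀ (k pos d : Nat), d - pos ≤ k → pos ≤ d → d ≤ s.length →
      (∀ j, pos ≤ j → j < d → s[j]? ≠ some '(' ∧ s[j]? ≠ some ')') →
      aScan s pos b = aScan s d b := by
  intro k
  induction k with
  | zero =>
    intro pos d hk hle _ _
    have : pos = d := by omega
    rw [this]
  | succ k ih =>
    intro pos d hk hle hdlen hch
    by_cases hpd : pos = d
    · rw [hpd]
    · have hlt : pos < d := by omega
      have hplen : pos < s.length := by omega
      have hg : s[pos]? = some s[pos] := List.getElem?_eq_getElem hplen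
      have hc := hch pos le_rfl hlt
      have hno : s[pos] ≠ '(' := fun h => hc.1 (by rw [hg, h])
      have hnc : s[pos] ≠ ')' := fun h => hc.2 (by rw [hg, h])
      rw [aScan]
      simp only [dif_pos hplen, if_neg hno, if_neg hnc, if_neg hb]
      exact ih (pos + 1) d (by omega) (by omega) hdlen
        (fun j h1 h2 => hch j (by omega) h2)

-- With balance ≥ 1 and no ')' at or after pos, A's scan never terminates with an end.
lemma aScan_none (s : List Char) :
    ∀ (k pos : Nat) (b : Int), s.length - pos ≤ k → 1 ≤ b →
      (∀ j, pos ≤ j → s[j]? ≠ some ')') → aScan s pos b = none := by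
  intro k
  induction k with
  | zero =>
    intro pos b hk _ _
    rw [aScan]
    exact dif_neg (by omega)
  | succ k ih =>
    intro pos b hk hb hch
    rw [aScan]
    by_cases hplen : pos < s.length
    · have hg : s[pos]? = some s[pos] := List.getElem?_eq_getElem hplen
      have hnc : s[pos] ≠ ')' := fun h => hch pos le_rfl (by rw [hg, h])
      simp only [dif_pos hplen, if_neg hnc]
      by_cases ho : s[pos] = '('
      · simp only [if_pos ho, if_neg (by omega : ¬ b + 1 = 0)]
        exact ih (pos + 1) (b + 1) (by omega) (by omega) (fun j h1 => hch j (by omega))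
      · simp only [if_neg ho, if_neg (by omega : ¬ b = 0)]
        exact ih (pos + 1) b (by omega) hb (fun j h1 => hch j (by omega))
    · exact dif_neg hplen

-- Main invariant: with balance ≥ 1 and enough fuel, B's skip loop agrees with A's scan.
lemma bLoop_eq_aScan (lib name : String) (start : Nat) :
    ∀ (fuel pos : Nat) (b : Int), pos ≤ lib.toList.length → 1 ≤ b →
      lib.toList.length - pos < fuel →
      bLoop lib name start fuel pos b =
        (match aScan lib.toList pos b with
          | none => (none, none)
          | some e => (some name, some (PySem.Str.slice lib (some (start : Int)) (some (e : Int))))) := by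
  intro fuel
  induction fuel with
  | zero => intro pos b h1 h2 h3; omega
  | succ fuel ih =>
    intro pos b hpos hb hfuel
    set s := lib.toList with hs
    rw [bLoop]
    simp only [PySem.Str.findFrom_eq, toList_close, toList_open, ← hs]
    by_cases hc : PySem.Chars.findFrom s [')'] (pos : Int) = -1
    · have hnoc : ∀ j, pos ≤ j → s[j]? ≠ some ')' :=
        fun j hj => no_char_of_not_infix
          ((PySem.Chars.findFrom_natCast_eq_neg_one_iff s [')'] pos hpos).mp hc) hj
      rw [aScan_none s (s.length - pos) pos b le_rfl hb hnoc]
      simp [hc]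
    · simp only [if_neg hc]
      obtain ⟨hcge, hcpref, hcmin⟩ := PySem.Chars.findFrom_natCast_spec s [')'] pos hpos hc
      set c := PySem.Chars.findFrom s [')'] (pos : Int) with hcdef
      have hc0 : (0 : Int) ≤ c := le_trans (Int.natCast_nonneg pos) hcge
      have hclos : s[c.toNat]? = some ')' := (single_prefix_iff ')' s c.toNat).mp hcpref
      have hclt : c.toNat < s.length := by obtain ⟨h, -⟩ := List.getElem?_eq_some_iff.mp hclos; exact h
      have hcposle : pos ≤ c.toNat := by omega
      by_cases ho : PySem.Chars.findFrom s ['('] (pos : Int) ≠ -1 ∧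
          PySem.Chars.findFrom s ['('] (pos : Int) < c
      · obtain ⟨hone, holt⟩ := ho
        obtain ⟨hoge, hopref, homin⟩ := PySem.Chars.findFrom_natCast_spec s ['('] pos hpos hone
        set o := PySem.Chars.findFrom s ['('] (pos : Int) with hodef
        have ho0 : (0 : Int) ≤ o := le_trans (Int.natCast_nonneg pos) hoge
        have hopen : s[o.toNat]? = some '(' := (single_prefix_iff '(' s o.toNat).mp hopref
        have holen : o.toNat < s.length := by obtain ⟨h, -⟩ := List.getElem?_eq_some_iff.mp hopen; exact h
        have hoposle : pos ≤ o.toNat := by omega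
        have hskip : aScan s pos b = aScan s o.toNat b :=
          aScan_skip s b (by omega) (o.toNat - pos) pos o.toNat (by omega) hoposle (le_of_lt holen)
            (fun j h1 h2 => ⟨fun h => homin j h1 h2 ((single_prefix_iff '(' s j).mpr h),
              fun h => hcmin j h1 (by omega) ((single_prefix_iff ')' s j).mpr h)⟩)
        have hoc : s[o.toNat] = '(' := by
          have := List.getElem?_eq_getElem holen
          rw [this] at hopen; exact (Option.some_inj.mp hopen)
        have hstep : aScan s o.toNat b = aScan s (o.toNat + 1) (b + 1) := by
          rw [aScan]
          simp only [dif_pos holen, hoc]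
          simp [show ¬ b + 1 = 0 from by omega]
        rw [if_pos ⟨hone, holt⟩, hskip, hstep]
        exact ih (o.toNat + 1) (b + 1) (by omega) (by omega) (by omega)
      · -- next delimiter is the ')' at c
        have hnopen : ∀ j, pos ≤ j → j < c.toNat → s[j]? ≠ some '(' := by
          intro j h1 h2
          by_cases hone : PySem.Chars.findFrom s ['('] (pos : Int) = -1
          · exact no_char_of_not_infix
              ((PySem.Chars.findFrom_natCast_eq_neg_one_iff s ['('] pos hpos).mp hone) h1
          · have hco : c ≤ PySem.Chars.findFrom s ['('] (pos : Int) := by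
              by_contra hcon
              exact ho ⟨hone, by omega⟩
            obtain ⟨hoge, hopref, homin⟩ :=
              PySem.Chars.findFrom_natCast_spec s ['('] pos hpos hone
            exact fun h => homin j h1 (by omega) ((single_prefix_iff '(' s j).mpr h)
        have hskip : aScan s pos b = aScan s c.toNat b :=
          aScan_skip s b (by omega) (c.toNat - pos) pos c.toNat (by omega) hcposle (le_of_lt hclt)
            (fun j h1 h2 => ⟨hnopen j h1 h2,
              fun h => hcmin j h1 h2 ((single_prefix_iff ')' s j).mpr h)⟩)
        have hcc : s[c.toNat] = ')' := by
          have := List.getElem?_eq_getElem hclt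
          rw [this] at hclos; exact (Option.some_inj.mp hclos)
        rw [if_neg ho, hskip]
        by_cases hb1 : 1 < b
        · have hstep : aScan s c.toNat b = aScan s (c.toNat + 1) (b - 1) := by
            rw [aScan]
            simp only [dif_pos hclt, hcc]
            simp [show (')' : Char) ≠ '(' from by decide, show ¬ b - 1 = 0 from by omega]
          rw [if_pos hb1, hstep]
          exact ih (c.toNat + 1) (b - 1) (by omega) (by omega) (by omega)
        · have hbeq : b = 1 := by omega
          have hstep : aScan s c.toNat b = some (c.toNat + 1) := by
            rw [aScan]
            simp only [dif_pos hclt, hcc, hbeq]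
            norm_num [show (')' : Char) ≠ '(' from by decide]
          rw [if_neg hb1, hstep]
          have : (c + 1 : Int) = ((c.toNat + 1 : Nat) : Int) := by
            push_cast; omega
          rw [this]

-- ===== VERDICT (by name: the statement is the Claim_ definition above) =====
theorem extract_named_symbol_py_spec : Claim_equal_extract_named_symbol_py := by
  intro lib name _
  simp only [Spec_extract_named_symbol_py, extract_named_symbol_py, extract_named_symbol_py_alt]
  set F := String.ofList ("(symbol \"".toList ++ name.toList ++ "\"\n".toList) with hF
  by_cases h : PySem.Str.find lib F = -1
  · rw [PySem.Str.find_eq] at h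
    simp [h]
  · simp only [if_neg h]
    set s := lib.toList with hs
    have hfind : PySem.Str.find lib F = PySem.Chars.find s F.toList := by
      rw [PySem.Str.find_eq]
    have hge : (0 : Int) ≤ PySem.Str.find lib F := by
      have h1 : (-1 : Int) ≤ PySem.Str.find lib F := by
        rw [hfind]; exact PySem.Chars.neg_one_le_find _ _
      omega
    set start := (PySem.Str.find lib F).toNat with hstart
    have hpref : F.toList <+: s.drop start := by
      have := (PySem.Chars.find_spec (s := s) (sub := F.toList) (by rw [← hfind]; omega)).1
      rwa [← hfind] at this
    have hFlist : F.toList = '(' :: ("symbol \"".toList ++ name.toList ++ "\"\n".toList) := by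
      rw [hF]
      simp [toList_needle_head]
    have hopen : s[start]? = some '(' := by
      rw [hFlist] at hpref
      obtain ⟨u, hu⟩ := hpref
      rw [← head?_drop', ← hu]
      simp
    have hslt : start < s.length := by obtain ⟨h, -⟩ := List.getElem?_eq_some_iff.mp hopen; exact h
    have hsc : s[start] = '(' := by
      have := List.getElem?_eq_getElem hslt
      rw [this] at hopen; exact Option.some_inj.mp hopen
    -- A side: first step of the scan
    have hA : aScan s start 0 = aScan s (start + 1) 1 := by
      rw [aScan]
      simp only [dif_pos hslt, hsc]
      norm_num
    -- B side: first iteration of the skip loop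
    rw [bLoop]
    simp only [PySem.Str.findFrom_eq, toList_close, toList_open, ← hs]
    have hoinf : ['('] <:+: s.drop start := ((single_prefix_iff '(' s start).mpr hopen).isInfix
    have hone : PySem.Chars.findFrom s ['('] (start : Int) ≠ -1 := fun hcon =>
      ((PySem.Chars.findFrom_natCast_eq_neg_one_iff s ['('] start (le_of_lt hslt)).mp hcon) hoinf
    obtain ⟨hoge, hopref, homin⟩ :=
      PySem.Chars.findFrom_natCast_spec s ['('] start (le_of_lt hslt) hone
    have hoeq : PySem.Chars.findFrom s ['('] (start : Int) = (start : Int) := by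
      have hle : (PySem.Chars.findFrom s ['('] (start : Int)).toNat ≤ start := by
        by_contra hcon
        exact homin start le_rfl (by omega) ((single_prefix_iff '(' s start).mpr hopen)
      omega
    by_cases hc : PySem.Chars.findFrom s [')'] (start : Int) = -1
    · have hnoc : ∀ j, start + 1 ≤ j → s[j]? ≠ some ')' := fun j hj =>
        no_char_of_not_infix
          ((PySem.Chars.findFrom_natCast_eq_neg_one_iff s [')'] start (le_of_lt hslt)).mp hc)
          (by omega)
      rw [hA, aScan_none s (s.length - (start + 1)) (start + 1) 1 le_rfl le_rfl hnoc]
      simp [hc]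
    · simp only [if_neg hc]
      obtain ⟨hcge, hcpref, hcmin⟩ :=
        PySem.Chars.findFrom_natCast_spec s [')'] start (le_of_lt hslt) hc
      have hclos : s[(PySem.Chars.findFrom s [')'] (start : Int)).toNat]? = some ')' :=
        (single_prefix_iff ')' s _).mp hcpref
      have hcne : PySem.Chars.findFrom s [')'] (start : Int) ≠ (start : Int) := by
        intro hcon
        rw [hcon] at hclos
        simp only [Int.toNat_natCast] at hclos
        rw [hopen] at hclos
        exact absurd (Option.some_inj.mp hclos) (by decide)
      have hcond : PySem.Chars.findFrom s ['('] (start : Int) ≠ -1 ∧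
          PySem.Chars.findFrom s ['('] (start : Int) < PySem.Chars.findFrom s [')'] (start : Int) := by
        refine ⟨hone, ?_⟩
        rw [hoeq]
        omega
      rw [if_pos hcond, hoeq, hA]
      have h1 : ((start : Int)).toNat = start := by omega
      rw [h1]
      exact (bLoop_eq_aScan lib name start s.length (start + 1) 1 (by rw [← hs]; omega) le_rfl
        (by rw [← hs]; omega)).symm
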